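-- pv_equiv track=rewrite | github.com/alexandraback/datacollection | solutions_1595491_0/Python/LouisP/template.py | get_best_score
-- ===== SOURCE A (Python) =====
-- def get_best_score(score, surprising=False):
--     '''Return the best possible score
--     >>> get_best_score(23, False)
--     8
--     >>> get_best_score(22, False)
--     8
--     >>> get_best_score(21, False)
--     7
--     >>> get_best_score(0, False)
--     0
--     >>> get_best_score(0, True)
--     0
--     >>> get_best_score(1, False)
--     1
--     >>> get_best_score(1, True)
--     1
--     >>> get_best_score(2, False)
--     1
--     >>> get_best_score(2, True)
--     2
--     >>> get_best_score(3, False)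
--     1
--     >>> get_best_score(3, True)
--     2
--     '''
--     if score == 0:
--         return 0
--     if score == 1:
--         return 1
--     if surprising:
--         offset = 2
--     else:
--         offset = 0
--     for i in range(3):
--         if (score + offset + i) > 30:
--             return -1
--         if (score + offset + i) % 3 == 0:
--             return (score + offset + i) // 3
--     else:
--         return -1
-- ===== SOURCE B (Python) =====
-- def get_best_score(score, surprising=False):
--     if score == 0:
--         return 0
--     if score == 1:
--         return 1
--     offset = 2 if surprising else 0
--     i = (3 - (score + offset) % 3) % 3
--     val = score + offset + i
--     if val > 30:
--         return -1
--     return val // 3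
-- ===== Notes on version B (the rewrite author's own statement) =====
-- stated objective: simpler
-- what changed: The bounded search loop over i in range(3) is replaced by a direct modular-arithmetic computation of the unique residue fix, followed by a single >30 check.
import Mathlib
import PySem

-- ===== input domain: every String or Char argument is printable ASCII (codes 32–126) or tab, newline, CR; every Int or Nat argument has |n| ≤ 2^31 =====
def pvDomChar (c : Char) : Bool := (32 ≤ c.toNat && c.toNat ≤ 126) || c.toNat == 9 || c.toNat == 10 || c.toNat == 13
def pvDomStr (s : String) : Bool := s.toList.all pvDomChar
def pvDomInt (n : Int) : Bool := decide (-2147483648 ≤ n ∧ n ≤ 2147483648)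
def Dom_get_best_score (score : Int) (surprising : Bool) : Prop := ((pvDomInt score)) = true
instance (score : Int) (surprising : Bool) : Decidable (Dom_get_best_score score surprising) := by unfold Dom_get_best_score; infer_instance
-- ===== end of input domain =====

-- B replaces A's 3-iteration search loop by a direct modular-arithmetic computation (simpler).


-- ===== PORT A =====
-- the 'for i in range(3): …' loop with its two early returns; [] is the loop's exhausted 'else: return -1'
def gbsLoopA (score offset : Int) : List Int → Int
  | [] => -1
  | i :: rest =>
    if score + offset + i > 30 then -1
    else if PySem.Int.mod (score + offset + i) 3 = 0 then PySem.Int.floordiv (score + offset + i) 3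
    else gbsLoopA score offset rest

def get_best_score (score : Int) (surprising : Bool) : Int :=
  if score = 0 then 0
  else if score = 1 then 1
  else
    let offset : Int := if surprising then 2 else 0
    gbsLoopA score offset (PySem.List.pyRange 0 3 1)

-- ===== PORT B =====
def get_best_score_alt (score : Int) (surprising : Bool) : Int :=
  if score = 0 then 0
  else if score = 1 then 1
  else
    let offset : Int := if surprising then 2 else 0
    let i : Int := PySem.Int.mod (3 - PySem.Int.mod (score + offset) 3) 3
    let val : Int := score + offset + i
    if val > 30 then -1 else PySem.Int.floordiv val 3

-- ===== PRECONDITION & SPEC =====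
def Spec_get_best_score (score : Int) (surprising : Bool) (out : Int) : Prop := out = get_best_score_alt score surprising
instance (score : Int) (surprising : Bool) (out : Int) : Decidable (Spec_get_best_score score surprising out) := by unfold Spec_get_best_score; infer_instance

-- ===== CLAIM (what is proved, stated in full; the proofs are below) =====
def Claim_equal_get_best_score : Prop := ∀ (score : Int) (surprising : Bool), Dom_get_best_score score surprising → Spec_get_best_score score surprising (get_best_score score surprising)

-- ===== LEMMAS AND PROOFS =====
theorem gbs_core (t : Int) :
    gbsLoopA 0 t [0, 1, 2] =
      (if t + PySem.Int.mod (3 - PySem.Int.mod t 3) 3 > 30 then -1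
       else PySem.Int.floordiv (t + PySem.Int.mod (3 - PySem.Int.mod t 3) 3) 3) := by
  have hm : ∀ x : Int, PySem.Int.mod x 3 = x % 3 :=
    fun _ => PySem.Int.mod_eq_emod_of_pos (by norm_num)
  have hd : ∀ x : Int, PySem.Int.floordiv x 3 = x / 3 :=
    fun _ => PySem.Int.floordiv_eq_ediv_of_pos (by norm_num)
  simp only [gbsLoopA, hm, hd]
  split_ifs <;> omega

theorem gbsLoopA_shift (score offset : Int) (l : List Int) :
    gbsLoopA score offset l = gbsLoopA 0 (score + offset) l := by
  induction l with
  | nil => rfl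
  | cons i rest ih =>
    simp only [gbsLoopA, ih, zero_add]

-- ===== VERDICT (by name: the statement is the Claim_ definition above) =====
theorem get_best_score_spec : Claim_equal_get_best_score := by
  intro score surprising _
  unfold Spec_get_best_score get_best_score get_best_score_alt
  by_cases h0 : score = 0
  · simp [h0]
  by_cases h1 : score = 1
  · simp [h1]
  simp only [h0, h1, if_false]
  have hr : PySem.List.pyRange 0 3 1 = [0, 1, 2] := by decide
  rw [hr, gbsLoopA_shift, gbs_core]
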